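-- pv_equiv track=rewrite | github.com/art8xai/python_education_seminars_homework | 2022-11-28_python_seminar3_HW/ex5.py | get_fibonacci_list
-- ===== SOURCE A (Python) =====
-- def get_fibonacci_list(n):
--     """Return a list of Fibonacci numbers, including those
--     for negative indices.
--     """
--     res = [0]
--     a, b = 0, 1
--     for i in range(n):
--         res.append(b)
--         a, b = b, a + b
--
--     a, b = 0, 1
--     for i in range(n):
--         a, b = b, a - b
--         res.insert(0, a)
--     return res
-- ===== SOURCE B (Python) =====
-- def get_fibonacci_list(n):
--     """Return a list of Fibonacci numbers, including those
--     for negative indices.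
--     """
--     m = max(n, 0)
--     fibs = [0, 1]
--     for i in range(2, m + 1):
--         fibs.append(fibs[i - 1] + fibs[i - 2])
--     fibs = fibs[:m + 1]
--     neg = [fibs[k] if k % 2 else -fibs[k] for k in range(m, 0, -1)]
--     return neg + fibs
-- ===== Notes on version B (the rewrite author's own statement) =====
-- stated objective: alternative
-- what changed: B removes A's second backward-recurrence loop: it builds only the positive Fibonacci prefix (by list indexing instead of a rolling pair) and derives the negative-index half from those values via the negafibonacci alternating-sign identity in a single comprehension.
import Mathlib
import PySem

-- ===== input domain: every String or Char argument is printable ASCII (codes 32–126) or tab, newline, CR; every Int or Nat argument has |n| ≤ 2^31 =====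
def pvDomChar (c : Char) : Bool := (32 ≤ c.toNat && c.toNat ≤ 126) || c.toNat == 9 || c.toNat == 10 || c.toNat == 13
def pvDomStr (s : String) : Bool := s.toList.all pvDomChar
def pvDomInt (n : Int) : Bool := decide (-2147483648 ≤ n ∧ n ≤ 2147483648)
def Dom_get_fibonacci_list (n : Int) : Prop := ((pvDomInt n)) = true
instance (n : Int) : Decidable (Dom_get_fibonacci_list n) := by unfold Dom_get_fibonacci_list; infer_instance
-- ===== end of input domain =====

-- B drops A's second (backward-recurrence) loop: the negative half is derived from the positive
-- Fibonacci values by the negafibonacci sign rule F(-k) = (-1)^(k+1) F(k); objective: alternative.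


-- ===== PORT A =====
def get_fibonacci_list (n : Int) : List Int :=
  -- res = [0]; a, b = 0, 1; for i in range(n): res.append(b); a, b = b, a + b
  let s1 := (PySem.List.pyRange 0 n 1).foldl
    (fun (st : List Int × Int × Int) _ => (st.1 ++ [st.2.2], st.2.2, st.2.1 + st.2.2))
    ([0], 0, 1)
  -- a, b = 0, 1; for i in range(n): a, b = b, a - b; res.insert(0, a)
  let s2 := (PySem.List.pyRange 0 n 1).foldl
    (fun (st : List Int × Int × Int) _ => (st.2.2 :: st.1, st.2.2, st.2.1 - st.2.2))
    (s1.1, 0, 1)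
  s2.1

-- ===== PORT B =====
def get_fibonacci_list_alt (n : Int) : List Int :=
  let m := max n 0
  -- fibs = [0, 1]; for i in range(2, m + 1): fibs.append(fibs[i - 1] + fibs[i - 2])
  let fibs := (PySem.List.pyRange 2 (m + 1) 1).foldl
    (fun fibs i => fibs ++ [PySem.List.pyGetD fibs (i - 1) 0 + PySem.List.pyGetD fibs (i - 2) 0])
    [0, 1]
  -- fibs = fibs[:m + 1]
  let fibs := PySem.List.slice fibs none (some (m + 1))
  -- neg = [fibs[k] if k % 2 else -fibs[k] for k in range(m, 0, -1)]
  let neg := (PySem.List.pyRange m 0 (-1)).map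
    (fun k => if PySem.Int.mod k 2 ≠ 0 then PySem.List.pyGetD fibs k 0 else -PySem.List.pyGetD fibs k 0)
  neg ++ fibs

-- ===== PRECONDITION & SPEC =====
def Spec_get_fibonacci_list (n : Int) (out : List Int) : Prop := out = get_fibonacci_list_alt n
instance (n : Int) (out : List Int) : Decidable (Spec_get_fibonacci_list n out) := by unfold Spec_get_fibonacci_list; infer_instance

-- ===== CLAIM (what is proved, stated in full; the proofs are below) =====
def Claim_equal_get_fibonacci_list : Prop := ∀ (n : Int), Dom_get_fibonacci_list n → Spec_get_fibonacci_list n (get_fibonacci_list n)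

-- ===== LEMMAS AND PROOFS =====

def fib : Nat → Int
  | 0 => 0
  | 1 => 1
  | (k+2) => fib k + fib (k+1)

-- F(-k) written with parity: F(-k) = (-1)^(k+1) F(k)
def negfib (k : Nat) : Int := if k % 2 = 0 then -fib k else fib k

lemma negfib_succ (m : Nat) :
    negfib (m+1) = if m % 2 = 0 then fib (m+1) else -(fib (m+1)) := by
  unfold negfib
  rcases Nat.even_or_odd m with h | h
  · simp [Nat.even_iff.mp h, Nat.succ_mod_two_eq_one_iff.mpr (Nat.even_iff.mp h)]
  · simp [Nat.odd_iff.mp h, Nat.succ_mod_two_eq_zero_iff.mpr (Nat.odd_iff.mp h)]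

-- A's first loop: m iterations yield [F0..Fm] with (a,b) = (Fm, F(m+1))
lemma auxA1 (m : Nat) :
    ((List.range m).foldl
      (fun (st : List Int × Int × Int) _ => (st.1 ++ [st.2.2], st.2.2, st.2.1 + st.2.2))
      ([0], 0, 1)) = ((List.range (m+1)).map (fun k => fib k), fib m, fib (m+1)) := by
  induction m with
  | zero => simp [fib]
  | succ m ih =>
    rw [List.range_succ, List.foldl_append, ih]
    simp [List.range_succ, fib]

-- A's second loop: m iterations prepend [F(-m)..F(-1)] to r0
lemma auxA2 (m : Nat) (r0 : List Int) :
    ((List.range m).foldl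
      (fun (st : List Int × Int × Int) _ => (st.2.2 :: st.1, st.2.2, st.2.1 - st.2.2))
      (r0, 0, 1)) =
    ((List.range m).map (fun j => negfib (m - j)) ++ r0, negfib m,
      if m % 2 = 0 then fib (m+1) else -(fib (m+1))) := by
  induction m with
  | zero => simp [negfib, fib]
  | succ m ih =>
    rw [List.range_succ, List.foldl_append, ih]
    have hl : (List.range (m+1)).map (fun j => negfib (m+1-j))
        = negfib (m+1) :: (List.range m).map (fun j => negfib (m-j)) := by
      rw [List.range_succ_eq_map, List.map_cons, List.map_map]
      simp [Nat.succ_sub_succ]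
    conv_rhs => rw [← List.range_succ]
    rw [hl, ← negfib_succ]
    refine Prod.ext ?_ (Prod.ext rfl ?_)
    · simp
    · simp only [negfib_succ]
      by_cases h : m % 2 = 0
      · have h1 : (m+1) % 2 ≠ 0 := by omega
        simp [negfib, h, h1, fib]; ring
      · have h1 : (m+1) % 2 = 0 := by omega
        simp [negfib, h, h1, fib]

-- B's forward loop: for t ≥ 1 it builds [F0..Ft]
lemma auxB (t : Nat) (h : 1 ≤ t) :
    ((PySem.List.pyRange 2 ((t:Int)+1) 1).foldl
      (fun fibs i => fibs ++ [PySem.List.pyGetD fibs (i - 1) 0 + PySem.List.pyGetD fibs (i - 2) 0])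
      [0, 1]) = (List.range (t+1)).map (fun k => fib k) := by
  induction t, h using Nat.le_induction with
  | base =>
    rw [PySem.List.pyRange_one_eq_nil (by norm_num)]
    simp [List.range_succ, fib]
  | succ t ht ih =>
    have hsplit : PySem.List.pyRange 2 ((t:Int)+1+1) 1
        = PySem.List.pyRange 2 ((t:Int)+1) 1 ++ [(t:Int)+1] := by
      exact PySem.List.pyRange_one_succ_right (by omega)
    have hc : (((t+1:Nat)):Int) + 1 = (t:Int)+1+1 := by omega
    rw [hc, hsplit, List.foldl_append, ih]
    have h1 : ((t:Int)+1-1) = ((t:Nat):Int) := by omega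
    have h2 : ((t:Int)+1-2) = (((t-1:Nat)):Int) := by omega
    rw [List.foldl_cons, List.foldl_nil, h1, h2,
        PySem.List.pyGetD_natCast, PySem.List.pyGetD_natCast,
        List.getD_eq_getElem?_getD, List.getD_eq_getElem?_getD]
    have g1 : (List.map (fun k => fib k) (List.range (t+1)))[t]?.getD 0 = fib t := by simp
    have g2 : (List.map (fun k => fib k) (List.range (t+1)))[t-1]?.getD 0 = fib (t-1) := by simp
    rw [g1, g2]
    obtain ⟨s, rfl⟩ : ∃ s, t = s + 1 := ⟨t - 1, by omega⟩
    simp [List.range_succ, fib]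
    ring

-- ===== VERDICT (by name: the statement is the Claim_ definition above) =====
theorem get_fibonacci_list_spec : Claim_equal_get_fibonacci_list := by
  intro n _
  show get_fibonacci_list n = get_fibonacci_list_alt n
  unfold get_fibonacci_list get_fibonacci_list_alt
  by_cases hn : n ≤ 0
  · rw [PySem.List.pyRange_one_eq_nil hn, max_eq_right hn]
    decide
  · have hn' : 0 < n := not_le.mp hn
    obtain ⟨t, rfl⟩ : ∃ t : Nat, n = (t : Int) := ⟨n.toNat, (Int.toNat_of_nonneg hn'.le).symm⟩
    have ht : 1 ≤ t := by exact_mod_cast hn'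
    have hmax : max ((t:Int)) 0 = (t:Int) := max_eq_left (by positivity)
    rw [hmax, PySem.List.pyRange_one]
    simp only [Int.sub_zero, Int.toNat_natCast, List.foldl_map, auxA1, auxA2]
    rw [auxB t ht]
    have hfibs : (PySem.List.slice ((List.range (t+1)).map (fun k => fib k)) none (some ((t:Int)+1)))
        = (List.range (t+1)).map (fun k => fib k) := by
      rw [PySem.List.slice_to _ (by omega)]
      simp
    rw [hfibs]
    congr 1
    rw [PySem.List.pyRange_neg_one, List.map_map]
    simp only [Int.sub_zero, Int.toNat_natCast]
    refine List.map_congr_left ?_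
    intro j hj
    rw [List.mem_range] at hj
    have hk : (t:Int) - (j:Int) = ((t - j : Nat) : Int) := by omega
    simp only [Function.comp_apply, hk, PySem.List.pyGetD_natCast]
    have hlt : t - j < t + 1 := by omega
    rw [PySem.List.getD_map_range _ _ _ _ hlt]
    have hmod : PySem.Int.mod (((t-j:Nat)):Int) 2 = (((t-j) % 2 : Nat) : Int) := by
      exact_mod_cast PySem.Int.mod_natCast (t-j) 2
    simp only [negfib, hmod]
    by_cases hp : (t-j) % 2 = 0
    · rw [if_pos hp, if_neg (by simp [hp])]
    · rw [if_neg hp, if_pos (by omega)]
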